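-- pv_equiv track=rewrite | github.com/Angleito/Single-Agent-Trader | bot/utils/web_search_formatter.py | _prioritize_insights
-- ===== SOURCE A (Python) =====
-- def _prioritize_insights(insights: list[str]) -> list[str]:
--     """Prioritize insights based on trading relevance."""
--     priority_keywords = {
--         "breakout": 10,
--         "institutional": 9,
--         "regulatory": 8,
--         "sentiment": 7,
--         "volume": 6,
--         "technical": 5,
--         "adoption": 4,
--     }
--
--     def get_priority(insight: str) -> int:
--         insight_lower = insight.lower()
--         for keyword, priority in priority_keywords.items():
--             if keyword in insight_lower:
--                 return priority
--         return 1
--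
--     return sorted(insights, key=get_priority, reverse=True)
-- ===== SOURCE B (Python) =====
-- def _prioritize_insights(insights: list[str]) -> list[str]:
--     """Single-pass 8-bucket partition (if/elif chain), concatenated in descending priority."""
--     b10 = []; b9 = []; b8 = []; b7 = []; b6 = []; b5 = []; b4 = []; b1 = []
--     for s in insights:
--         t = s.lower()
--         if "breakout" in t:
--             b10.append(s)
--         elif "institutional" in t:
--             b9.append(s)
--         elif "regulatory" in t:
--             b8.append(s)
--         elif "sentiment" in t:
--             b7.append(s)
--         elif "volume" in t:
--             b6.append(s)
--         elif "technical" in t: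
--             b5.append(s)
--         elif "adoption" in t:
--             b4.append(s)
--         else:
--             b1.append(s)
--     return b10 + b9 + b8 + b7 + b6 + b5 + b4 + b1
-- ===== Notes on version B (the rewrite author's own statement) =====
-- stated objective: faster
-- what changed: Replaces the keyword dict plus stable comparison sort (sorted with key, reverse=True) by a single-pass bucket partition: an if/elif substring chain drops each insight into one of eight priority buckets, which are concatenated in descending priority order.
import Mathlib
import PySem

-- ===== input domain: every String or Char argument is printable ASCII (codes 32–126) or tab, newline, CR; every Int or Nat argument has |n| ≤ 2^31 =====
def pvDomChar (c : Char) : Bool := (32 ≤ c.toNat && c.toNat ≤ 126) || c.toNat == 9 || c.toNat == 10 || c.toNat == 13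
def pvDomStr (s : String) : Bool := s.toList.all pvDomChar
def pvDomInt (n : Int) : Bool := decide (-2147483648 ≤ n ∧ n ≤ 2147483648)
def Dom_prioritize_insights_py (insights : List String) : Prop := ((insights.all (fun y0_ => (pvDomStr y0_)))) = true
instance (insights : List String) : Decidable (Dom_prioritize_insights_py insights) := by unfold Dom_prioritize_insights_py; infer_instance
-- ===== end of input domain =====

-- B replaces the keyword-dict + stable reverse comparison sort by a single-pass
-- 8-bucket partition (if/elif substring chain) concatenated in descending priority
-- order (alternative decomposition, same return value).


-- ===== PORT A =====
-- priority_keywords dict literal (insertion order)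
def pyKeywordPairs : List (String × Int) :=
  [("breakout", 10), ("institutional", 9), ("regulatory", 8), ("sentiment", 7),
   ("volume", 6), ("technical", 5), ("adoption", 4)]

def pyPriorityKeywords : PySem.Dict String Int := PySem.Dict.ofList pyKeywordPairs

-- the 'for keyword, priority in priority_keywords.items(): if keyword in insight_lower: return priority' loop
def pyGetPriorityLoop (items : List (String × Int)) (insightLower : String) : Int :=
  match items with
  | [] => 1
  | (keyword, priority) :: rest =>
      if PySem.Str.isIn keyword insightLower then priority
      else pyGetPriorityLoop rest insightLower

def pyGetPriority (insight : String) : Int :=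
  pyGetPriorityLoop pyPriorityKeywords.items (PySem.Str.lower insight)

def prioritize_insights_py (insights : List String) : List String :=
  PySem.List.sorted insights pyGetPriority true

-- ===== PORT B =====
-- eight buckets b10 … b1 as in Source B
structure PvB8 where
  b10 : List String
  b9  : List String
  b8  : List String
  b7  : List String
  b6  : List String
  b5  : List String
  b4  : List String
  b1  : List String
deriving Repr, DecidableEq

-- the body of Source B's for-loop: the if/elif chain appending s to one bucket
def altStep (acc : PvB8) (s : String) : PvB8 :=
  let t := PySem.Str.lower s
  if PySem.Str.isIn "breakout" t then { acc with b10 := acc.b10 ++ [s] }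
  else if PySem.Str.isIn "institutional" t then { acc with b9 := acc.b9 ++ [s] }
  else if PySem.Str.isIn "regulatory" t then { acc with b8 := acc.b8 ++ [s] }
  else if PySem.Str.isIn "sentiment" t then { acc with b7 := acc.b7 ++ [s] }
  else if PySem.Str.isIn "volume" t then { acc with b6 := acc.b6 ++ [s] }
  else if PySem.Str.isIn "technical" t then { acc with b5 := acc.b5 ++ [s] }
  else if PySem.Str.isIn "adoption" t then { acc with b4 := acc.b4 ++ [s] }
  else { acc with b1 := acc.b1 ++ [s] }

def prioritize_insights_py_alt (insights : List String) : List String :=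
  let r := insights.foldl altStep ⟨[], [], [], [], [], [], [], []⟩
  r.b10 ++ r.b9 ++ r.b8 ++ r.b7 ++ r.b6 ++ r.b5 ++ r.b4 ++ r.b1

-- ===== PRECONDITION & SPEC =====
def Spec_prioritize_insights_py (insights : List String) (out : List String) : Prop := out = prioritize_insights_py_alt insights
instance (insights : List String) (out : List String) : Decidable (Spec_prioritize_insights_py insights out) := by unfold Spec_prioritize_insights_py; infer_instance

-- ===== CLAIM (what is proved, stated in full; the proofs are below) =====
def Claim_equal_prioritize_insights_py : Prop := ∀ (insights : List String), Dom_prioritize_insights_py insights → Spec_prioritize_insights_py insights (prioritize_insights_py insights)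

-- ===== LEMMAS AND PROOFS =====

def altPriorities : List Int := [10, 9, 8, 7, 6, 5, 4, 1]

theorem items_eq : pyPriorityKeywords.items = pyKeywordPairs := by decide

theorem pyGetPriority_mem (s : String) : pyGetPriority s ∈ altPriorities := by
  simp only [pyGetPriority, items_eq, pyKeywordPairs, pyGetPriorityLoop, altPriorities]
  split_ifs <;> simp

-- the filter-bucket form both sides are reduced to
def pvBuckets (insights : List String) : List String :=
  altPriorities.flatMap (fun p => insights.filter (fun s => pyGetPriority s == p))

def pvFilt (insights : List String) (p : Int) : List String :=
  insights.filter (fun s => pyGetPriority s == p)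

-- B's fold state after xs is exactly the eight filter buckets
-- get_priority written out as Source B's if/elif chain
theorem pyGetPriority_unfold (s : String) :
    pyGetPriority s =
      (if PySem.Str.isIn "breakout" (PySem.Str.lower s) then 10
       else if PySem.Str.isIn "institutional" (PySem.Str.lower s) then 9
       else if PySem.Str.isIn "regulatory" (PySem.Str.lower s) then 8
       else if PySem.Str.isIn "sentiment" (PySem.Str.lower s) then 7
       else if PySem.Str.isIn "volume" (PySem.Str.lower s) then 6
       else if PySem.Str.isIn "technical" (PySem.Str.lower s) then 5
       else if PySem.Str.isIn "adoption" (PySem.Str.lower s) then 4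
       else 1) := by
  show pyGetPriorityLoop pyPriorityKeywords.items (PySem.Str.lower s) = _
  rw [items_eq]
  rfl

theorem filt_append (xs : List String) (x : String) (p : Int) :
    pvFilt (xs ++ [x]) p = pvFilt xs p ++ (if pyGetPriority x = p then [x] else []) := by
  unfold pvFilt
  rw [List.filter_append]
  simp [List.filter_singleton]

set_option maxHeartbeats 1000000 in
theorem altStep_filters (xs : List String) (x : String) :
    altStep ⟨pvFilt xs 10, pvFilt xs 9, pvFilt xs 8, pvFilt xs 7,
             pvFilt xs 6, pvFilt xs 5, pvFilt xs 4, pvFilt xs 1⟩ x =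
      ⟨pvFilt (xs ++ [x]) 10, pvFilt (xs ++ [x]) 9, pvFilt (xs ++ [x]) 8,
       pvFilt (xs ++ [x]) 7, pvFilt (xs ++ [x]) 6, pvFilt (xs ++ [x]) 5,
       pvFilt (xs ++ [x]) 4, pvFilt (xs ++ [x]) 1⟩ := by
  rw [filt_append xs x 10, filt_append xs x 9, filt_append xs x 8, filt_append xs x 7,
    filt_append xs x 6, filt_append xs x 5, filt_append xs x 4, filt_append xs x 1,
    pyGetPriority_unfold]
  simp only [altStep]
  split_ifs <;> first | omega | simp

theorem foldl_altStep_eq (xs : List String) :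
    xs.foldl altStep ⟨[], [], [], [], [], [], [], []⟩ =
      ⟨pvFilt xs 10, pvFilt xs 9, pvFilt xs 8, pvFilt xs 7,
       pvFilt xs 6, pvFilt xs 5, pvFilt xs 4, pvFilt xs 1⟩ := by
  induction xs using List.reverseRecOn with
  | nil => simp [pvFilt]
  | append_singleton xs x ih =>
      rw [List.foldl_append, List.foldl_cons, List.foldl_nil, ih, altStep_filters]

theorem alt_eq_buckets (insights : List String) :
    prioritize_insights_py_alt insights = pvBuckets insights := by
  simp [prioritize_insights_py_alt, foldl_altStep_eq, pvBuckets, altPriorities, pvFilt]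

-- inserting behind all non-before elements and before all before elements
theorem insertBy_split {α : Type} (before : α → α → Bool) (x : α) (l₁ l₂ : List α)
    (h₁ : ∀ y ∈ l₁, before x y = false) (h₂ : ∀ y ∈ l₂, before x y = true) :
    PySem.List.insertBy before x (l₁ ++ l₂) = l₁ ++ x :: l₂ := by
  induction l₁ with
  | nil =>
      cases l₂ with
      | nil => rfl
      | cons b t => simp [PySem.List.insertBy, h₂ b (by simp)]
  | cons a t ih =>
      have ha := h₁ a (by simp)
      simp only [List.cons_append, PySem.List.insertBy, ha]
      simp [ih (fun y hy => h₁ y (by simp [hy]))]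

theorem mem_bucket_key {p : Int} {xs : List String} {y : String}
    (hy : y ∈ xs.filter (fun s => pyGetPriority s == p)) : pyGetPriority y = p := by
  simpa using (List.mem_filter.mp hy).2

-- appending one element to the input appends it to its bucket = one insertBy step
theorem buckets_append (xs : List String) (x : String) :
    pvBuckets (xs ++ [x]) =
      PySem.List.insertBy (fun a b => decide (pyGetPriority b < pyGetPriority a)) x
        (pvBuckets xs) := by
  obtain ⟨P₁, P₂, hps⟩ := List.append_of_mem (pyGetPriority_mem x)
  have hpw : altPriorities.Pairwise (fun a b => b < a) := by decide
  rw [hps] at hpw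
  have h₁ : ∀ p ∈ P₁, pyGetPriority x < p := by
    intro p hp
    exact (List.pairwise_append.mp hpw).2.2 p hp _ (by simp)
  have h₂ : ∀ p ∈ P₂, p < pyGetPriority x :=
    fun p hp => (List.pairwise_cons.mp (List.pairwise_append.mp hpw).2.1).1 p hp
  have hfilter : ∀ p : Int, (xs ++ [x]).filter (fun s => pyGetPriority s == p)
      = xs.filter (fun s => pyGetPriority s == p)
        ++ if pyGetPriority x = p then [x] else [] := by
    intro p; rw [List.filter_append]; simp [List.filter_singleton]
  have hne : ∀ p : Int, p ≠ pyGetPriority x →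
      (xs ++ [x]).filter (fun s => pyGetPriority s == p)
        = xs.filter (fun s => pyGetPriority s == p) := by
    intro p hp
    rw [hfilter p, if_neg (fun h => hp h.symm)]
    simp
  unfold pvBuckets
  rw [hps]
  rw [List.flatMap_append, List.flatMap_append, List.flatMap_cons, List.flatMap_cons]
  rw [List.flatMap_congr (fun p hp => hne p (ne_of_gt (h₁ p hp))),
      List.flatMap_congr (fun p hp => hne p (ne_of_lt (h₂ p hp))),
      hfilter (pyGetPriority x), if_pos rfl]
  have := insertBy_split (fun a b => decide (pyGetPriority b < pyGetPriority a)) x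
    (P₁.flatMap (fun p => xs.filter (fun s => pyGetPriority s == p))
      ++ xs.filter (fun s => pyGetPriority s == (pyGetPriority x)))
    (P₂.flatMap (fun p => xs.filter (fun s => pyGetPriority s == p)))
    (by
      intro y hy
      rcases List.mem_append.mp hy with hy | hy
      · obtain ⟨p, hp, hyp⟩ := List.mem_flatMap.mp hy
        have := mem_bucket_key hyp
        simp [this]
        exact le_of_lt (h₁ p hp)
      · have := mem_bucket_key hy
        simp [this])
    (by
      intro y hy
      obtain ⟨p, hp, hyp⟩ := List.mem_flatMap.mp hy
      have := mem_bucket_key hyp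
      simp [this]
      exact h₂ p hp)
  rw [List.append_assoc] at this ⊢
  rw [this]
  simp

theorem sorted_eq_buckets (insights : List String) :
    PySem.List.sorted insights pyGetPriority true = pvBuckets insights := by
  induction insights using List.reverseRecOn with
  | nil => simp [PySem.List.sorted_rev_eq_foldl_insertBy, pvBuckets]
  | append_singleton xs x ih =>
      rw [PySem.List.sorted_rev_eq_foldl_insertBy, List.foldl_append,
        ← PySem.List.sorted_rev_eq_foldl_insertBy, List.foldl_cons, List.foldl_nil,
        ih, buckets_append]

-- ===== VERDICT (by name: the statement is the Claim_ definition above) =====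
theorem prioritize_insights_py_spec : Claim_equal_prioritize_insights_py := by
  intro insights _
  unfold Spec_prioritize_insights_py
  rw [alt_eq_buckets, ← sorted_eq_buckets]
  rfl
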